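-- pv_equiv track=rewrite | github.com/rubenhortas/python_examples | cryptography/vigenere_decrypter.py | _get_shifts_from_key
-- ===== SOURCE A (Python) =====
-- LANGUAGE_FREQUENCIES = {
--     'A': 8.4966,
--     'B': 2.0720,
--     'C': 4.5388,
--     'D': 3.3844,
--     'E': 11.1607,
--     'F': 1.8121,
--     'G': 2.4705,
--     'H': 3.0034,
--     'I': 7.5448,
--     'J': 0.1965,
--     'K': 1.1016,
--     'L': 5.4893,
--     'M': 3.0129,
--     'N': 6.6544,
--     'O': 7.1635,
--     'P': 3.1671,
--     'Q': 0.1962,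
--     'R': 7.5809,
--     'S': 5.7351,
--     'T': 6.9509,
--     'U': 3.6308,
--     'V': 1.0074,
--     'W': 1.2899,
--     'X': 0.2902,
--     'Y': 1.7779,
--     'Z': 0.2722
-- }
--
-- def _get_shifts_from_key(key: str) -> list:
--     shifts = []
--
--     for key_character in key:
--         i = 0
--
--         for character_frequency in LANGUAGE_FREQUENCIES:
--             if key_character == character_frequency:
--                 shifts.append(i)
--                 break
--
--             i = i + 1
--
--     return shifts
-- ===== SOURCE B (Python) =====
-- LANGUAGE_FREQUENCIES = {
--     'A': 8.4966, 'B': 2.0720, 'C': 4.5388, 'D': 3.3844, 'E': 11.1607,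
--     'F': 1.8121, 'G': 2.4705, 'H': 3.0034, 'I': 7.5448, 'J': 0.1965,
--     'K': 1.1016, 'L': 5.4893, 'M': 3.0129, 'N': 6.6544, 'O': 7.1635,
--     'P': 3.1671, 'Q': 0.1962, 'R': 7.5809, 'S': 5.7351, 'T': 6.9509,
--     'U': 3.6308, 'V': 1.0074, 'W': 1.2899, 'X': 0.2902, 'Y': 1.7779,
--     'Z': 0.2722
-- }
--
--
-- def _get_shifts_from_key(key: str) -> list:
--     # The dict's keys are exactly the letters 'A'..'Z' in order, so a key
--     # character matches iff it lies in that range, and its position in the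
--     # dict is its code minus the code of 'A': no scan over the dict needed.
--     return [ord(c) - ord('A') for c in key if 'A' <= c <= 'Z']
-- ===== Notes on version B (the rewrite author's own statement) =====
-- stated objective: faster
-- what changed: Drops the inner counter scan over the 26 dict keys entirely: a single comprehension emits the closed-form alphabet position ord(c)-65 for each character in the 'A'..'Z' range (valid because the dict's keys are exactly A..Z in order).
import Mathlib
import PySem

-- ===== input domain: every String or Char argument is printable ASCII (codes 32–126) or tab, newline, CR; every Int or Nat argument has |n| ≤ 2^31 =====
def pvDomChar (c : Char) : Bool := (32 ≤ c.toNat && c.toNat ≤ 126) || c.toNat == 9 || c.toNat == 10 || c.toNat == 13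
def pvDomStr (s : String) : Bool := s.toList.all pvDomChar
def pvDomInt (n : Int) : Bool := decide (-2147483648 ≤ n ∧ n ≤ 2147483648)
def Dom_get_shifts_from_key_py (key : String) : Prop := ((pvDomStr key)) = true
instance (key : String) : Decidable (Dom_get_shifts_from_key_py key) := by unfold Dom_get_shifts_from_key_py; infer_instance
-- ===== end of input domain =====

-- B drops A's inner counter scan over the 26 dict keys: one comprehension with a
-- range test 'A' ≤ c ≤ 'Z' and the closed-form position code(c) - 65 (objective: faster).
-- The float values of LANGUAGE_FREQUENCIES are never read by either program
-- (only key iteration / equality), so A's dict is ported as its key list.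

-- ===== PORT A =====
def languageFrequencyKeys : List Char :=
  ['A','B','C','D','E','F','G','H','I','J','K','L','M',
   'N','O','P','Q','R','S','T','U','V','W','X','Y','Z']

-- inner 'for character_frequency in LANGUAGE_FREQUENCIES' loop with counter i;
-- on match appends i to shifts and breaks.
def innerA (c : Char) : List Char → Int → List Int → List Int
  | [], _, shifts => shifts
  | a :: rest, i, shifts =>
      if c = a then shifts ++ [i] else innerA c rest (i + 1) shifts

def outerA : List Char → List Int → List Int
  | [], shifts => shifts
  | c :: cs, shifts => outerA cs (innerA c languageFrequencyKeys 0 shifts)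

def get_shifts_from_key_py (key : String) : List Int :=
  outerA key.toList []

-- ===== PORT B =====
def get_shifts_from_key_py_alt (key : String) : List Int :=
  key.toList.filterMap (fun c =>
    if 65 ≤ c.toNat ∧ c.toNat ≤ 90 then some ((c.toNat : Int) - 65) else none)

-- ===== PRECONDITION & SPEC =====
def Spec_get_shifts_from_key_py (key : String) (out : List Int) : Prop := out = get_shifts_from_key_py_alt key
instance (key : String) (out : List Int) : Decidable (Spec_get_shifts_from_key_py key out) := by unfold Spec_get_shifts_from_key_py; infer_instance

-- ===== CLAIM (what is proved, stated in full; the proofs are below) =====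
def Claim_equal_get_shifts_from_key_py : Prop := ∀ (key : String), Dom_get_shifts_from_key_py key → Spec_get_shifts_from_key_py key (get_shifts_from_key_py key)

-- ===== LEMMAS AND PROOFS =====

theorem innerA_shape (c : Char) (l : List Char) (i : Int) (shifts : List Int) :
    innerA c l i shifts = shifts ++ (innerA c l i []) := by
  induction l generalizing i shifts with
  | nil => simp [innerA]
  | cons a rest ih =>
      by_cases h : c = a
      · simp [innerA, h]
      · simp only [innerA, if_neg h]
        rw [ih]

theorem mem_keys_iff (c : Char) :
    c ∈ languageFrequencyKeys ↔ (65 ≤ c.toNat ∧ c.toNat ≤ 90) := by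
  constructor
  · intro hc; fin_cases hc <;> decide
  · intro ⟨h1, h2⟩
    rw [← Char.ofNat_toNat c]
    set n := c.toNat with hn
    interval_cases n <;> decide

theorem innerA_not_mem (c : Char) (l : List Char) (i : Int) (h : c ∉ l) :
    innerA c l i [] = [] := by
  induction l generalizing i with
  | nil => rfl
  | cons a rest ih =>
      have hne : c ≠ a := fun hc => h (hc ▸ List.mem_cons_self)
      simp only [innerA, if_neg hne]
      exact ih _ (fun hm => h (List.mem_cons_of_mem _ hm))

theorem innerA_step (c : Char) :
    innerA c languageFrequencyKeys 0 [] =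
      (if 65 ≤ c.toNat ∧ c.toNat ≤ 90 then some ((c.toNat : Int) - 65) else none).toList := by
  by_cases h : 65 ≤ c.toNat ∧ c.toNat ≤ 90
  · rw [if_pos h]
    have hc : c ∈ languageFrequencyKeys := (mem_keys_iff c).2 h
    fin_cases hc <;> decide
  · rw [if_neg h, innerA_not_mem c _ _ (fun hm => h ((mem_keys_iff c).1 hm))]
    rfl

theorem outerA_filterMap (cs : List Char) (shifts : List Int) :
    outerA cs shifts = shifts ++ cs.filterMap (fun c =>
      if 65 ≤ c.toNat ∧ c.toNat ≤ 90 then some ((c.toNat : Int) - 65) else none) := by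
  induction cs generalizing shifts with
  | nil => simp [outerA]
  | cons c rest ih =>
      simp only [outerA]
      rw [ih, innerA_shape, innerA_step, List.filterMap_cons]
      split <;> simp

-- ===== VERDICT (by name: the statement is the Claim_ definition above) =====
theorem get_shifts_from_key_py_spec : Claim_equal_get_shifts_from_key_py := by
  intro key _
  unfold Spec_get_shifts_from_key_py get_shifts_from_key_py get_shifts_from_key_py_alt
  rw [outerA_filterMap]
  simp
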